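-- pv_equiv track=rewrite | github.com/ardatalar/EuropeOrthoViewer | wmts_utils.py | _prefer_matrix_set
-- ===== SOURCE A (Python) =====
-- from typing import Dict, List, Optional
--
-- def _prefer_matrix_set(sets: List[Dict]) -> Optional[str]:
--     if not sets:
--         return None
--
--     def is_3857(crs: Optional[str]) -> bool:
--         s = (crs or "").lower().replace("::", ":")
--         return "3857" in s or "900913" in s or "webmercator" in s.replace(" ", "")
--
--     def is_4326(crs: Optional[str]) -> bool:
--         s = (crs or "").lower()
--         return "4326" in s or "wgs84" in s.replace(" ", "")
--
--     for s in sets: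
--         if is_3857(s.get("crs")):
--             return s["id"]
--     for s in sets:
--         if is_4326(s.get("crs")):
--             return s["id"]
--     return sets[0]["id"]
-- ===== SOURCE B (Python) =====
-- from typing import Dict, List, Optional
--
-- def _prefer_matrix_set(sets: List[Dict]) -> Optional[str]:
--     if not sets:
--         return None
--
--     def is_3857(crs: Optional[str]) -> bool:
--         s = (crs or "").lower().replace("::", ":")
--         return "3857" in s or "900913" in s or "webmercator" in s.replace(" ", "")
--
--     def is_4326(crs: Optional[str]) -> bool:
--         s = (crs or "").lower()
--         return "4326" in s or "wgs84" in s.replace(" ", "")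
--
--     first_3857 = None
--     first_4326 = None
--     for s in sets:
--         crs = s.get("crs")
--         if is_3857(crs):
--             first_3857 = s
--             break
--         if first_4326 is None and is_4326(crs):
--             first_4326 = s
--     chosen = first_3857 if first_3857 is not None else (first_4326 if first_4326 is not None else sets[0])
--     return chosen["id"]
-- ===== Notes on version B (the rewrite author's own statement) =====
-- stated objective: alternative
-- what changed: Replaces A's two sequential scans over the list with a single pass that records the first 3857 match (breaking early) and the first 4326 match in two option variables, then picks 3857, else 4326, else sets[0]; Pre_ only excludes inputs where both programs raise KeyError for a selected set lacking the 'id' key, or TypeError for a non-string crs (outside the ported type anyway).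
import Mathlib
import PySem

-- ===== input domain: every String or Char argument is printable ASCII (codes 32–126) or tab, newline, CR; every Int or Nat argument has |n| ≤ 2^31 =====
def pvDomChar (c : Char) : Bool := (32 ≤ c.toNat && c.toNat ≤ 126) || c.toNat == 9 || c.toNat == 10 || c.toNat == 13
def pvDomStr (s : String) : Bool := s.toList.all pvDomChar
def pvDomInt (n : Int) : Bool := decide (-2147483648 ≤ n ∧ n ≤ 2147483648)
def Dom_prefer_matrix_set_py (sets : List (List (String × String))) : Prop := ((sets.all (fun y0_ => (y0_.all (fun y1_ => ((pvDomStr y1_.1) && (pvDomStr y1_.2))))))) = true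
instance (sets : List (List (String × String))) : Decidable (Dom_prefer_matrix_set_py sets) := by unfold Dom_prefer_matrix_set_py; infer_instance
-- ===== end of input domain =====

-- B replaces A's two sequential scans with one pass keeping the first 3857 and first 4326 matches; same cost, different decomposition.

-- ===== PORT A =====
-- helper is_3857 (shared text in both Pythons); crs = None (missing key) ↦ none, '(crs or "")' = .getD ""
def pvIs3857 (crs : Option String) : Bool :=
  let s := PySem.Str.replace (PySem.Str.lower (crs.getD "")) "::" ":"
  PySem.Str.isIn "3857" s || PySem.Str.isIn "900913" s ||
    PySem.Str.isIn "webmercator" (PySem.Str.replace s " " "")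

-- helper is_4326 (shared text in both Pythons)
def pvIs4326 (crs : Option String) : Bool :=
  let s := PySem.Str.lower (crs.getD "")
  PySem.Str.isIn "4326" s || PySem.Str.isIn "wgs84" (PySem.Str.replace s " " "")

-- first for-loop of A: return s["id"] at the first set whose crs is 3857
def pvALoop1 (l : List (List (String × String))) : Option (List (String × String)) :=
  match l with
  | [] => none
  | s :: t => if pvIs3857 ((PySem.Dict.mk s).get? "crs") then some s else pvALoop1 t

-- second for-loop of A: first set whose crs is 4326
def pvALoop2 (l : List (List (String × String))) : Option (List (String × String)) :=
  match l with
  | [] => none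
  | s :: t => if pvIs4326 ((PySem.Dict.mk s).get? "crs") then some s else pvALoop2 t

-- the three 'return s["id"]' sites of A, combined; s["id"] raises KeyError when absent:
-- Pre_ excludes that, the port returns get? (none outside Pre_)
def pvAFinish (o1 o2 : Option (List (String × String))) (s0 : List (String × String)) : Option String :=
  match o1 with
  | some s => (PySem.Dict.mk s).get? "id"
  | none =>
    match o2 with
    | some s => (PySem.Dict.mk s).get? "id"
    | none => (PySem.Dict.mk s0).get? "id"

def prefer_matrix_set_py (sets : List (List (String × String))) : Option String :=
  match sets with
  | [] => none
  | s0 :: _ => pvAFinish (pvALoop1 sets) (pvALoop2 sets) s0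

-- ===== PORT B =====
-- B's single for-loop: returns (first_3857, first_4326); breaks as soon as a 3857 match is stored
def pvBLoop (l : List (List (String × String))) (f4326 : Option (List (String × String))) :
    Option (List (String × String)) × Option (List (String × String)) :=
  match l with
  | [] => (none, f4326)
  | s :: t =>
    let crs := (PySem.Dict.mk s).get? "crs"
    if pvIs3857 crs then (some s, f4326)
    else pvBLoop t (if f4326.isNone && pvIs4326 crs then some s else f4326)

-- B's 'chosen = first_3857 if ... else (first_4326 if ... else sets[0])'
def pvChoose (r : Option (List (String × String)) × Option (List (String × String)))
    (s0 : List (String × String)) : List (String × String) :=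
  match r.1 with
  | some s => s
  | none =>
    match r.2 with
    | some s => s
    | none => s0

def prefer_matrix_set_py_alt (sets : List (List (String × String))) : Option String :=
  match sets with
  | [] => none
  | s0 :: _ => (PySem.Dict.mk (pvChoose (pvBLoop sets none) s0)).get? "id"

-- ===== PRECONDITION & SPEC =====
-- Pre_ excludes exactly the inputs where Python A raises KeyError: the selected set (first 3857
-- match, else first 4326 match, else sets[0]) has no "id" key. Both Pythons raise there.
-- the selected set (first 3857 match, else first 4326 match, else sets[0]) must carry the "id" key
def pvPreB (sets : List (List (String × String))) : Bool :=
  match sets with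
  | [] => true
  | s0 :: _ =>
    match sets.find? (fun s => pvIs3857 ((PySem.Dict.mk s).get? "crs")) with
    | some s => (PySem.Dict.mk s).contains "id"
    | none =>
      match sets.find? (fun s => pvIs4326 ((PySem.Dict.mk s).get? "crs")) with
      | some s => (PySem.Dict.mk s).contains "id"
      | none => (PySem.Dict.mk s0).contains "id"
def Pre_prefer_matrix_set_py (sets : List (List (String × String))) : Prop := pvPreB sets = true
instance (sets : List (List (String × String))) : Decidable (Pre_prefer_matrix_set_py sets) := by
  unfold Pre_prefer_matrix_set_py; infer_instance
def pvWitness_prefer_matrix_set_py : (List (List (String × String))) :=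
  [[("id", "A"), ("crs", "EPSG:25832")], [("id", "B"), ("crs", "EPSG:3857")]]
def Spec_prefer_matrix_set_py (sets : List (List (String × String))) (out : Option String) : Prop := out = prefer_matrix_set_py_alt sets
instance (sets : List (List (String × String))) (out : Option String) : Decidable (Spec_prefer_matrix_set_py sets out) := by unfold Spec_prefer_matrix_set_py; infer_instance

-- ===== CLAIM (what is proved, stated in full; the proofs are below) =====
def Claim_equal_prefer_matrix_set_py : Prop := ∀ (sets : List (List (String × String))), Dom_prefer_matrix_set_py sets → Pre_prefer_matrix_set_py sets → Spec_prefer_matrix_set_py sets (prefer_matrix_set_py sets)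

-- ===== LEMMAS AND PROOFS =====

-- first component of B's loop = A's first scan
theorem pvBLoop_fst (l : List (List (String × String))) (f : Option (List (String × String))) :
    (pvBLoop l f).1 = pvALoop1 l := by
  induction l generalizing f with
  | nil => rfl
  | cons s t ih =>
    simp only [pvBLoop, pvALoop1]
    split_ifs <;> simp [ih]

-- when no 3857 match exists, B's second accumulator collects f orElse A's second scan
theorem pvBLoop_snd (l : List (List (String × String))) (f : Option (List (String × String)))
    (h : pvALoop1 l = none) : (pvBLoop l f).2 = f.orElse (fun _ => pvALoop2 l) := by
  induction l generalizing f with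
  | nil => cases f <;> rfl
  | cons s t ih =>
    simp only [pvALoop1] at h
    by_cases h3 : pvIs3857 ((PySem.Dict.mk s).get? "crs")
    · simp [h3] at h
    · rw [show pvBLoop (s :: t) f
            = pvBLoop t (if f.isNone && pvIs4326 ((PySem.Dict.mk s).get? "crs") then some s else f)
          from by simp [pvBLoop, h3]]
      rw [ih _ (by simpa [h3] using h)]
      simp only [pvALoop2]
      cases f with
      | none => by_cases h4 : pvIs4326 ((PySem.Dict.mk s).get? "crs") <;> simp [h4]
      | some x => by_cases h4 : pvIs4326 ((PySem.Dict.mk s).get? "crs") <;> simp [h4]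

-- ===== VERDICT (by name: the statement is the Claim_ definition above) =====
theorem prefer_matrix_set_py_spec : Claim_equal_prefer_matrix_set_py := by
  intro sets _ _
  unfold Spec_prefer_matrix_set_py
  cases sets with
  | nil => rfl
  | cons s0 rest =>
    have hA : prefer_matrix_set_py (s0 :: rest)
        = pvAFinish (pvALoop1 (s0 :: rest)) (pvALoop2 (s0 :: rest)) s0 := rfl
    have hB : prefer_matrix_set_py_alt (s0 :: rest)
        = (PySem.Dict.mk (pvChoose (pvBLoop (s0 :: rest) none) s0)).get? "id" := rfl
    rw [hA, hB]
    have h1 : (pvBLoop (s0 :: rest) none).1 = pvALoop1 (s0 :: rest) := pvBLoop_fst _ _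
    cases hA1 : pvALoop1 (s0 :: rest) with
    | some s =>
      rw [hA1] at h1
      simp [pvAFinish, pvChoose, h1]
    | none =>
      rw [hA1] at h1
      have h2 := pvBLoop_snd (s0 :: rest) none hA1
      cases hA2 : pvALoop2 (s0 :: rest) with
      | some s => rw [hA2] at h2; simp [pvAFinish, pvChoose, h1, h2]
      | none => rw [hA2] at h2; simp [pvAFinish, pvChoose, h1, h2]
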